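-- pv_equiv track=rewrite | github.com/madscientoast/NDCMS | Analysis Framework/pairing.py | uniques_old
-- ===== SOURCE A (Python) =====
-- def uniques_old(lst):
--     newlst=[sub[0]+sub[1] for sub in lst] #Flattens list
--     res = []
--     #This filters out bad combinations
--     for i in newlst:
--         flag = False
--         for j in i:
--             if i.count(j) > 1:
--                 flag = True
--         if flag is False:
--             res.append(i)
--     newlst = [[[r[0],r[1]],[r[2],r[3]]]for r in res] #put back into pairs
--     return (newlst)
-- ===== SOURCE B (Python) =====
-- def uniques_old(lst):
--     out = []
--     for sub in lst:
--         f = sub[0] + sub[1]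
--         s = sorted(f)
--         if all(x != y for x, y in zip(s, s[1:])):
--             out.append([[f[0], f[1]], [f[2], f[3]]])
--     return out
-- ===== Notes on version B (the rewrite author's own statement) =====
-- stated objective: alternative
-- what changed: Single pass over the input that detects duplicates by sorting each flattened element and scanning adjacent positions for equality (sort-then-scan), instead of A's staged passes with a quadratic i.count(j) flag loop, and builds the reshaped output directly as it goes.
import Mathlib
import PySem

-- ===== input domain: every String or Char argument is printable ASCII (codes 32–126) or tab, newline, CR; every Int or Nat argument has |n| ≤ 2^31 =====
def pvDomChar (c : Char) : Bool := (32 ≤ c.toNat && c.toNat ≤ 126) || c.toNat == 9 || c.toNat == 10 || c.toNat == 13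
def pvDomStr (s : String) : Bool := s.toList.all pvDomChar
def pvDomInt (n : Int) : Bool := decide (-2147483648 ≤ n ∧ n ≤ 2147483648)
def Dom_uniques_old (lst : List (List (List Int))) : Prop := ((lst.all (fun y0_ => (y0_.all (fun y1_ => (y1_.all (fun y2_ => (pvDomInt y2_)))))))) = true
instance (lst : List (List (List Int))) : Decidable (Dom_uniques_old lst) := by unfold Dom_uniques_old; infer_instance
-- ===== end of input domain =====

-- B detects duplicates by sorting each flattened element and scanning adjacent positions
-- for equality in a single pass, instead of A's staged passes with per-element count scans.


-- sub[0] + sub[1] (total form; exact whenever sub has at least 2 elements, which Pre_ guarantees)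
def pvFlat (sub : List (List Int)) : List Int :=
  (PySem.List.pyGet? sub 0).getD [] ++ (PySem.List.pyGet? sub 1).getD []

-- [[r[0],r[1]],[r[2],r[3]]] (total form; exact whenever r has at least 4 elements, which Pre_ guarantees for survivors)
def pvReshape (r : List Int) : List (List Int) :=
  [[(PySem.List.pyGet? r 0).getD 0, (PySem.List.pyGet? r 1).getD 0],
   [(PySem.List.pyGet? r 2).getD 0, (PySem.List.pyGet? r 3).getD 0]]

-- ===== PORT A =====
def uniques_old (lst : List (List (List Int))) : List (List (List Int)) :=
  let newlst := lst.map (fun sub => pvFlat sub)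
  let res := newlst.foldl (fun res i =>
    let flag := i.foldl (fun flag j => if i.count j > 1 then true else flag) false
    if flag = false then res ++ [i] else res) []
  res.map (fun r => pvReshape r)

-- ===== PORT B =====
def uniques_old_alt (lst : List (List (List Int))) : List (List (List Int)) :=
  lst.foldl (fun out sub =>
    let f := pvFlat sub
    let s := PySem.List.sorted f (fun x => x) false
    if (s.zip (PySem.List.slice s (some 1) none)).all (fun p => !(p.1 == p.2)) then
      out ++ [pvReshape f]
    else out) []

-- ===== PRECONDITION & SPEC =====
-- Pre_ is exactly where the Python A returns: each sub needs two entries (else sub[1] raises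
-- IndexError), and each flattened element that survives the duplicate filter (i.e. is duplicate-free)
-- needs at least 4 entries for the reshape r[0]..r[3] (else IndexError).
def Pre_uniques_old (lst : List (List (List Int))) : Prop :=
  ∀ sub ∈ lst, 2 ≤ sub.length ∧ (¬ (pvFlat sub).Nodup ∨ 4 ≤ (pvFlat sub).length)
instance (lst : List (List (List Int))) : Decidable (Pre_uniques_old lst) := by
  unfold Pre_uniques_old; infer_instance

def pvWitness_uniques_old : List (List (List Int)) := [[[1, 2], [3, 4]], [[1, 2], [2, 5]]]

def Spec_uniques_old (lst : List (List (List Int))) (out : List (List (List Int))) : Prop := out = uniques_old_alt lst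
instance (lst : List (List (List Int))) (out : List (List (List Int))) : Decidable (Spec_uniques_old lst out) := by unfold Spec_uniques_old; infer_instance

-- ===== CLAIM (what is proved, stated in full; the proofs are below) =====
def Claim_equal_uniques_old : Prop := ∀ (lst : List (List (List Int))), Dom_uniques_old lst → Pre_uniques_old lst → Spec_uniques_old lst (uniques_old lst)

-- ===== LEMMAS AND PROOFS =====

-- A's inner flag loop computes "some element occurs more than once".
theorem pvFlagFold (l : List Int) (p : Int → Prop) [DecidablePred p] (b : Bool) :
    l.foldl (fun flag j => if p j then true else flag) b = (b || l.any (fun j => decide (p j))) := by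
  induction l generalizing b with
  | nil => simp
  | cons x xs ih =>
    simp only [List.foldl_cons, List.any_cons, ih]
    by_cases h : p x <;> simp [h]

theorem pvAnyCount (i : List Int) :
    (i.any (fun j => decide (i.count j > 1))) = !decide i.Nodup := by
  rcases h : i.any (fun j => decide (i.count j > 1)) with _ | _
  · simp only [List.any_eq_false] at h
    have : i.Nodup := by
      rw [List.nodup_iff_count_le_one]
      intro a
      by_cases ha : a ∈ i
      · have hc := h a ha; simp at hc; omega
      · simp [List.count_eq_zero_of_not_mem ha]
    simp [this]
  · simp only [List.any_eq_true] at h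
    obtain ⟨a, _, ha⟩ := h
    simp only [decide_eq_true_eq] at ha
    have : ¬ i.Nodup := fun hn => by
      rw [List.nodup_iff_count_le_one] at hn
      have := hn a; omega
    simp [this]

-- So A's loop keeps exactly the Nodup elements.
theorem pvResFilter (newlst : List (List Int)) (acc : List (List Int)) :
    newlst.foldl (fun res i =>
      let flag := i.foldl (fun flag j => if i.count j > 1 then true else flag) false
      if flag = false then res ++ [i] else res) acc
    = acc ++ newlst.filter (fun f => decide f.Nodup) := by
  induction newlst generalizing acc with
  | nil => simp
  | cons x xs ih =>
    have hx : x.foldl (fun flag j => if x.count j > 1 then true else flag) false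
        = !decide x.Nodup := by
      rw [pvFlagFold x (fun j => x.count j > 1), pvAnyCount]; simp
    simp only [List.foldl_cons, List.filter_cons, hx]
    rcases h : decide x.Nodup with _ | _ <;>
      simp only [Bool.not_true, Bool.not_false] <;> rw [ih] <;> simp

-- B's adjacent scan on a weakly increasing list decides Nodup.
theorem pvAdjNodup : ∀ (s : List Int), s.Pairwise (· ≤ ·) →
    ((s.zip s.tail).all (fun p => !(p.1 == p.2))) = decide s.Nodup := by
  intro s hs
  induction s with
  | nil => simp
  | cons a t ih =>
    cases t with
    | nil => simp
    | cons b u =>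
      rcases List.pairwise_cons.mp hs with ⟨hab, htail⟩
      have ihe := ih htail
      simp only [List.tail_cons, List.zip_cons_cons, List.all_cons] at ihe ⊢
      rcases List.pairwise_cons.mp htail with ⟨hbu, _⟩
      by_cases hne : a = b
      · subst hne
        simp
      · have hlt : a < b := lt_of_le_of_ne (hab b (by simp)) hne
        have hnm : a ∉ b :: u := by
          intro hmem
          rcases List.mem_cons.mp hmem with h1 | h2
          · exact hne h1
          · exact absurd (lt_of_lt_of_le hlt (hbu a h2)) (lt_irrefl a)
        simp [hne, ihe, hnm, List.nodup_cons]

-- B's fold builds the filtered, reshaped list directly.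
theorem pvAltFold (lst : List (List (List Int))) (acc : List (List (List Int))) :
    lst.foldl (fun out sub =>
      let f := pvFlat sub
      let s := PySem.List.sorted f (fun x => x) false
      if (s.zip (PySem.List.slice s (some 1) none)).all (fun p => !(p.1 == p.2)) then
        out ++ [pvReshape f]
      else out) acc
    = acc ++ ((lst.map pvFlat).filter (fun f => decide f.Nodup)).map pvReshape := by
  induction lst generalizing acc with
  | nil => simp
  | cons x xs ih =>
    have hcond : (((PySem.List.sorted (pvFlat x) (fun x => x) false).zip
          (PySem.List.slice (PySem.List.sorted (pvFlat x) (fun x => x) false) (some 1) none)).all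
          (fun p => !(p.1 == p.2))) = decide (pvFlat x).Nodup := by
      rw [PySem.List.slice_from_one,
          pvAdjNodup _ (PySem.List.sorted_pairwise (pvFlat x) (fun x => x))]
      exact decide_eq_decide.mpr (PySem.List.sorted_perm (pvFlat x) (fun x => x) false).nodup_iff
    simp only [List.foldl_cons, List.map_cons, List.filter_cons, hcond]
    rcases h : decide (pvFlat x).Nodup with _ | _ <;> rw [ih] <;> simp

-- ===== VERDICT (by name: the statement is the Claim_ definition above) =====
theorem uniques_old_spec : Claim_equal_uniques_old := by
  intro lst _ _
  show uniques_old lst = uniques_old_alt lst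
  simp only [uniques_old, uniques_old_alt, pvResFilter, pvAltFold]
  simp [List.filter_map, Function.comp_def]
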